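-- pv_equiv track=rewrite | github.com/jacob-erard-professional/Advent_of_Code | day_four/day_four_part_two.py | parse_to_2d_array
-- ===== SOURCE A (Python) =====
-- def parse_to_2d_array(text):
--     lines = text.split('\n')
--
--     while lines and not lines[0].strip():
--         lines.pop(0)
--     while lines and not lines[-1].strip():
--         lines.pop()
--
--     grid = [list(line) for line in lines]
--
--     return grid
-- ===== SOURCE B (Python) =====
-- def parse_to_2d_array(text):
--     lines = text.split('\n')
--     keep = [i for i, line in enumerate(lines) if line.strip()]
--     if not keep:
--         return []
--     return [list(line) for line in lines[keep[0]:keep[-1] + 1]]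
-- ===== Notes on version B (the rewrite author's own statement) =====
-- stated objective: simpler
-- what changed: B finds the indices of all non-blank lines in one pass and takes a single slice between the first and the last, instead of A's two while-pop erosion loops mutating the list.
import Mathlib
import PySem

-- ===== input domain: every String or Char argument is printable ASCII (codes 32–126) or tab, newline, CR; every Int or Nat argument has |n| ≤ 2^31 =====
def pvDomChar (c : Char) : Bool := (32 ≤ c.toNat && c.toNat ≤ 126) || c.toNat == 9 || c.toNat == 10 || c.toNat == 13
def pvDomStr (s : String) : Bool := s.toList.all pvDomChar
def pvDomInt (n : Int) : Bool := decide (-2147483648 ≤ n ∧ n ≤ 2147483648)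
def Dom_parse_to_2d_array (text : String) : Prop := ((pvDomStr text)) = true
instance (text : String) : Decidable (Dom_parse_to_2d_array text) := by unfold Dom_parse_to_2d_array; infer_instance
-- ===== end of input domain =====

-- B replaces A's two while-pop erosion loops by a one-pass list of non-blank line
-- indices and a single slice (objective: simpler); return values agree everywhere.

-- ===== PORT A =====
-- while lines and not lines[0].strip(): lines.pop(0)
def pvDropFront (ls : List String) : List String :=
  match ls with
  | [] => []
  | l :: rest => if PySem.Str.strip l == "" then pvDropFront rest else l :: rest

-- while lines and not lines[-1].strip(): lines.pop()
def pvDropBack (ls : List String) : List String :=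
  if h : ls.isEmpty then []
  else
    if PySem.Str.strip (ls.getLast (by simpa [List.isEmpty_iff] using h)) == "" then
      pvDropBack ls.dropLast
    else ls
termination_by ls.length
decreasing_by
  have : ls ≠ [] := by simpa [List.isEmpty_iff] using h
  have : 0 < ls.length := List.length_pos_iff.mpr this
  simp [List.length_dropLast]; omega

def parse_to_2d_array (text : String) : List (List String) :=
  -- text.split('\n'): sep is the nonempty literal "\n", so split? is always some
  let lines := (PySem.Str.split? text "\n").getD []
  (pvDropBack (pvDropFront lines)).map (fun line => line.toList.map Char.toString)

-- ===== PORT B =====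
def parse_to_2d_array_alt (text : String) : List (List String) :=
  let lines := (PySem.Str.split? text "\n").getD []
  let keep := ((PySem.List.enumerate lines).filter (fun p => !(PySem.Str.strip p.2 == ""))).map (·.1)
  match keep with
  | [] => []
  | a :: rest =>
      (PySem.List.slice lines (some a) (some ((a :: rest).getLast (by simp) + 1))).map
        (fun line => line.toList.map Char.toString)

-- ===== PRECONDITION & SPEC =====
def Spec_parse_to_2d_array (text : String) (out : List (List String)) : Prop := out = parse_to_2d_array_alt text
instance (text : String) (out : List (List String)) : Decidable (Spec_parse_to_2d_array text out) := by unfold Spec_parse_to_2d_array; infer_instance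

-- ===== CLAIM (what is proved, stated in full; the proofs are below) =====
def Claim_equal_parse_to_2d_array : Prop := ∀ (text : String), Dom_parse_to_2d_array text → Spec_parse_to_2d_array text (parse_to_2d_array text)

-- ===== LEMMAS AND PROOFS =====

def pvBlank (l : String) : Bool := PySem.Str.strip l == ""

theorem pvDropFront_eq (ls : List String) : pvDropFront ls = ls.dropWhile pvBlank := by
  induction ls with
  | nil => rfl
  | cons l rest ih =>
      cases h : (PySem.Str.strip l == "") <;>
        simp [pvDropFront, List.dropWhile, pvBlank, h, ih]

theorem pvDropBack_eq (ls : List String) : pvDropBack ls = ls.rdropWhile pvBlank := by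
  induction ls using List.reverseRecOn with
  | nil => simp [pvDropBack]
  | append_singleton l x ih =>
      rw [pvDropBack]
      have hne : ¬ (l ++ [x]).isEmpty := by simp
      rw [dif_neg hne]
      rw [List.rdropWhile_concat]
      simp only [List.getLast_append_singleton, List.dropLast_concat, pvBlank] at *
      split_ifs with h <;> simp_all

def pvKeep (ls : List String) (s : Int) : List Int :=
  ((PySem.List.enumerate ls s).filter (fun p => !(PySem.Str.strip p.2 == ""))).map (·.1)

theorem pvKeep_nil (s : Int) : pvKeep [] s = [] := by
  simp [pvKeep, PySem.List.enumerate_nil]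

theorem pvKeep_cons (x : String) (ls : List String) (s : Int) :
    pvKeep (x :: ls) s = if pvBlank x then pvKeep ls (s + 1) else s :: pvKeep ls (s + 1) := by
  simp only [pvKeep, PySem.List.enumerate_cons, List.filter_cons, pvBlank]
  split_ifs with h <;> simp_all

theorem pvKeep_concat (ls : List String) (x : String) (s : Int) :
    pvKeep (ls ++ [x]) s = pvKeep ls s ++ (if pvBlank x then [] else [s + ls.length]) := by
  simp only [pvKeep, PySem.List.enumerate_append, List.filter_append, List.map_append,
    PySem.List.enumerate_cons, PySem.List.enumerate_nil, List.filter_cons, pvBlank]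
  split_ifs with h <;> simp_all

theorem pvKeep_eq_nil_iff (ls : List String) (s : Int) :
    pvKeep ls s = [] ↔ ∀ x ∈ ls, pvBlank x := by
  induction ls generalizing s with
  | nil => simp [pvKeep_nil]
  | cons x rest ih =>
      rw [pvKeep_cons]
      split_ifs with h <;> simp_all [ih (s + 1)]

theorem pvKeep_head (ls : List String) (s : Int) (h : ¬ ∀ x ∈ ls, pvBlank x) :
    (pvKeep ls s).head? = some (s + ((ls.takeWhile pvBlank).length : Int)) := by
  induction ls generalizing s with
  | nil => simp at h
  | cons x rest ih =>
      rw [pvKeep_cons]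
      by_cases hx : pvBlank x
      · have h' : ¬ ∀ y ∈ rest, pvBlank y := fun hall =>
          h (fun y hy => by rcases List.mem_cons.mp hy with rfl | hy'
                            exacts [hx, hall y hy'])
        rw [if_pos hx, ih (s + 1) h']
        simp only [List.takeWhile_cons, hx, if_true, List.length_cons, Option.some.injEq]
        push_cast
        ring
      · rw [if_neg hx]
        simp [hx]

theorem pvKeep_last (ls : List String) (s : Int) (h : ¬ ∀ x ∈ ls, pvBlank x) :
    (pvKeep ls s).getLast? =
      some (s + (ls.length : Int) - 1 - ((ls.reverse.takeWhile pvBlank).length : Int)) := by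
  induction ls using List.reverseRecOn generalizing s with
  | nil => simp at h
  | append_singleton l x ih =>
      rw [pvKeep_concat]
      by_cases hx : pvBlank x
      · have h' : ¬ ∀ y ∈ l, pvBlank y := fun hall =>
          h (fun y hy => by rcases List.mem_append.mp hy with hy' | hy'
                            exacts [hall y hy', by simp at hy'; exact hy' ▸ hx])
        rw [if_pos hx]
        simp only [List.append_nil]
        rw [ih s h']
        simp only [List.reverse_append, List.reverse_singleton, List.singleton_append,
          List.takeWhile_cons, hx, if_true, List.length_cons, List.length_append,
          List.length_nil, Option.some.injEq]
        push_cast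
        ring
      · rw [if_neg hx]
        rw [List.getLast?_concat]
        simp only [List.reverse_append, List.reverse_singleton, List.singleton_append,
          List.takeWhile_cons, hx, if_false, List.length_nil, List.length_append,
          List.length_cons, Option.some.injEq, Bool.false_eq_true]
        push_cast
        ring

-- takeWhile over an append stops inside the first part if it contains a failing element
theorem takeWhile_append_of_exists {α : Type} (p : α → Bool) (l₁ l₂ : List α)
    (h : ∃ x ∈ l₁, ¬ p x) : (l₁ ++ l₂).takeWhile p = l₁.takeWhile p := by
  induction l₁ with
  | nil => simp at h
  | cons x rest ih =>
      by_cases hx : p x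
      · simp only [List.cons_append, List.takeWhile_cons, hx]
        have h' : ∃ y ∈ rest, ¬ p y := by
          rcases h with ⟨y, hy, hpy⟩
          rcases List.mem_cons.mp hy with rfl | hy'
          · exact absurd hx hpy
          · exact ⟨y, hy', hpy⟩
        simp [ih h']
      · simp [hx]

theorem dropWhile_eq_drop {α : Type} (p : α → Bool) (l : List α) :
    l.dropWhile p = l.drop (l.takeWhile p).length := by
  induction l with
  | nil => rfl
  | cons x rest ih =>
      simp only [List.dropWhile, List.takeWhile]
      cases hp : p x <;> simp [ih]

theorem rdropWhile_eq_take {α : Type} (p : α → Bool) (l : List α) :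
    l.rdropWhile p = l.take (l.length - (l.reverse.takeWhile p).length) := by
  have h1 : (l.reverse.takeWhile p).length ≤ l.length := by
    have := (List.takeWhile_prefix (l := l.reverse) (p := p)).length_le
    simpa using this
  rw [List.rdropWhile, dropWhile_eq_drop, List.reverse_drop]
  simp

-- the core list-level equivalence: A's erosion = B's slice, for any line list
theorem trim_eq (lines : List String) :
    pvDropBack (pvDropFront lines) =
      match pvKeep lines 0 with
      | [] => []
      | a :: rest =>
          PySem.List.slice lines (some a) (some ((a :: rest).getLast (by simp) + 1)) := by
  rw [pvDropFront_eq, pvDropBack_eq]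
  by_cases hall : ∀ x ∈ lines, pvBlank x
  · have hk : pvKeep lines 0 = [] := (pvKeep_eq_nil_iff lines 0).mpr hall
    rw [hk]
    have : lines.dropWhile pvBlank = [] := List.dropWhile_eq_nil_iff.mpr hall
    simp [this]
  · have hk : pvKeep lines 0 ≠ [] := fun h => hall ((pvKeep_eq_nil_iff lines 0).mp h)
    obtain ⟨a, rest, hk'⟩ := List.exists_cons_of_ne_nil hk
    rw [hk']
    set f : Nat := (lines.takeWhile pvBlank).length with hf
    set t : Nat := (lines.reverse.takeWhile pvBlank).length with ht
    set n : Nat := lines.length with hn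
    have hhead : a = (f : Int) := by
      have := pvKeep_head lines 0 hall
      rw [hk'] at this; simp at this; omega
    have hlast : (a :: rest).getLast (by simp) = (n : Int) - 1 - (t : Int) := by
      have := pvKeep_last lines 0 hall
      rw [hk', List.getLast?_eq_some_getLast] at this
      simp at this; omega
    -- bounds
    have hfn : f < n := by
      have hne : lines.dropWhile pvBlank ≠ [] := by
        intro h; exact hall (List.dropWhile_eq_nil_iff.mp h)
      have := dropWhile_eq_drop pvBlank lines
      by_contra hfe
      rw [not_lt] at hfe
      rw [this, List.drop_eq_nil_of_le (by omega)] at hne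
      exact hne rfl
    -- head of the dropped part is non-blank
    have hhd : ∃ x ∈ lines.dropWhile pvBlank, ¬ pvBlank x := by
      have hne : lines.dropWhile pvBlank ≠ [] := by
        intro h; exact hall (List.dropWhile_eq_nil_iff.mp h)
      obtain ⟨y, ys, hy⟩ := List.exists_cons_of_ne_nil hne
      refine ⟨y, by simp [hy], ?_⟩
      have := List.head_dropWhile_not (p := pvBlank) (l := lines) hne
      simpa [hy] using this
    have hrevsplit : lines.reverse = (lines.dropWhile pvBlank).reverse ++ (lines.takeWhile pvBlank).reverse := by
      rw [← List.reverse_append, List.takeWhile_append_dropWhile]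
    have hrev : ∃ x ∈ (lines.dropWhile pvBlank).reverse, ¬ pvBlank x := by
      obtain ⟨x, hx, hpx⟩ := hhd; exact ⟨x, by simpa using hx, hpx⟩
    have ht' : t = (((lines.dropWhile pvBlank).reverse).takeWhile pvBlank).length := by
      rw [ht, hrevsplit, takeWhile_append_of_exists _ _ _ hrev]
    have htn : t ≤ n - f := by
      have h1 : (((lines.dropWhile pvBlank).reverse).takeWhile pvBlank).length
          ≤ (lines.dropWhile pvBlank).length := by
        have := (List.takeWhile_prefix (l := (lines.dropWhile pvBlank).reverse)
          (p := pvBlank)).length_le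
        simpa using this
      rw [ht']
      have h2 : (lines.dropWhile pvBlank).length = n - f := by
        rw [dropWhile_eq_drop]; simp [hn, hf]
      omega
    -- reduce the match on the literal cons
    show List.rdropWhile pvBlank (List.dropWhile pvBlank lines) =
      PySem.List.slice lines (some a) (some ((a :: rest).getLast (by simp) + 1))
    -- rewrite the slice
    have hb : (a :: rest).getLast (by simp) + 1 = ((n - t : Nat) : Int) := by
      rw [hlast]; omega
    rw [hb, hhead, PySem.List.slice_natCast]
    -- rewrite A's side
    rw [rdropWhile_eq_take, dropWhile_eq_drop, ← hf]
    have ht2 : (((lines.drop f).reverse).takeWhile pvBlank).length = t := by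
      rw [ht']; congr 2; rw [dropWhile_eq_drop, ← hf]
    have hlen : (lines.drop f).length = n - f := by simp [hn]
    rw [ht2, hlen]
    congr 1
    omega

theorem core (lines : List String) :
    (pvDropBack (pvDropFront lines)).map (fun line => line.toList.map Char.toString) =
      match pvKeep lines 0 with
      | [] => []
      | a :: rest =>
          (PySem.List.slice lines (some a) (some ((a :: rest).getLast (by simp) + 1))).map
            (fun line => line.toList.map Char.toString) := by
  rw [trim_eq]
  cases pvKeep lines 0 <;> simp

-- ===== VERDICT (by name: the statement is the Claim_ definition above) =====
theorem parse_to_2d_array_spec : Claim_equal_parse_to_2d_array := by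
  intro text _
  unfold Spec_parse_to_2d_array parse_to_2d_array parse_to_2d_array_alt
  exact core ((PySem.Str.split? text "\n").getD [])
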